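-- pv_equiv track=rewrite | github.com/pwmcclung/codeProbs | bear.py | bear_dollars
-- ===== SOURCE A (Python) =====
-- def bear_dollars(jobs):
--     close_friend_dollars = 0
--     acquaintance_dollars = 0
--     friend_dollars = 0
--     reg_dollas = 0
--     for x in range(0,len(jobs)):
--         choice = str(jobs[x][1]).lower()
--         if choice == "close friend":
--             close_friend_dollars += jobs[x][0] * 25
--         elif  choice == "acquaintance":
--             acquaintance_dollars += jobs[x][0] * 100
--         elif choice == "friend":
--             friend_dollars += jobs[x][0] * 50
--         else:
--             reg_dollas += jobs[x][0] * 125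
--     monies_earned = close_friend_dollars + acquaintance_dollars + friend_dollars + reg_dollas
--     return monies_earned
-- ===== SOURCE B (Python) =====
-- def bear_dollars(jobs):
--     # Discount formulation: charge everyone the default rate (125),
--     # then subtract each known category's discount in separate passes.
--     tagged = [(amount, str(rel).lower()) for amount, rel in jobs]
--     total = 125 * sum(a for a, _ in tagged)
--     total -= 100 * sum(a for a, r in tagged if r == "close friend")
--     total -= 25 * sum(a for a, r in tagged if r == "acquaintance")
--     total -= 75 * sum(a for a, r in tagged if r == "friend")
--     return total
-- ===== Notes on version B (the rewrite author's own statement) =====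
-- stated objective: alternative
-- what changed: Replaces A's single branching pass with four accumulators by a discount formulation in staged passes: 125 times the sum of all amounts, minus the per-category discounts (100, 25, 75) each computed by its own filtered sum.
import Mathlib
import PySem

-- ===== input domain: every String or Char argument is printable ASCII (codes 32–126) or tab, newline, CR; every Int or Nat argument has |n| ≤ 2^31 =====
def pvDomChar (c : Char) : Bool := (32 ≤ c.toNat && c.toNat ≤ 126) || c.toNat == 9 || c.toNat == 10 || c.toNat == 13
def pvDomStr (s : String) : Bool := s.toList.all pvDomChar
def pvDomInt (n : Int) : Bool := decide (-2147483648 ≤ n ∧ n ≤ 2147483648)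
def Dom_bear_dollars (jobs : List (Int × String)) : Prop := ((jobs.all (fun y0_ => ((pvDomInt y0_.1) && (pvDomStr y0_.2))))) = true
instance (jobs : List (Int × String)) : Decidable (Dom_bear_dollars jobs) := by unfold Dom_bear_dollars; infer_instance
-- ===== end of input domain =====

-- B replaces A's single branching pass (four accumulators, if/elif ladder) by a discount
-- formulation in staged passes: 125 * sum of all amounts minus per-category discounts (same cost).


-- ===== PORT A =====
-- the for-x-in-range(0,len(jobs)) loop visits the list elements in order; ported as structural
-- recursion over the list carrying the four accumulators (close_friend, acquaintance, friend, reg)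
def bearLoop : List (Int × String) → Int × Int × Int × Int → Int × Int × Int × Int
  | [], s => s
  | j :: rest, (cf, aq, fr, rg) =>
    let choice := PySem.Str.lower j.2
    if choice = "close friend" then bearLoop rest (cf + j.1 * 25, aq, fr, rg)
    else if choice = "acquaintance" then bearLoop rest (cf, aq + j.1 * 100, fr, rg)
    else if choice = "friend" then bearLoop rest (cf, aq, fr + j.1 * 50, rg)
    else bearLoop rest (cf, aq, fr, rg + j.1 * 125)

def bear_dollars (jobs : List (Int × String)) : Int :=
  match bearLoop jobs (0, 0, 0, 0) with
  | (cf, aq, fr, rg) => cf + aq + fr + rg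

-- ===== PORT B =====
-- Source B's 'sum(a for a, r in tagged if r == c)' ported as a filtered map-sum
def bearCatSum (tagged : List (Int × String)) (c : String) : Int :=
  ((tagged.filter (fun p => p.2 = c)).map (·.1)).sum

def bear_dollars_alt (jobs : List (Int × String)) : Int :=
  let tagged := jobs.map (fun j => (j.1, PySem.Str.lower j.2))
  125 * (tagged.map (·.1)).sum
    - 100 * bearCatSum tagged "close friend"
    - 25 * bearCatSum tagged "acquaintance"
    - 75 * bearCatSum tagged "friend"

-- ===== PRECONDITION & SPEC =====
def Spec_bear_dollars (jobs : List (Int × String)) (out : Int) : Prop := out = bear_dollars_alt jobs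
instance (jobs : List (Int × String)) (out : Int) : Decidable (Spec_bear_dollars jobs out) := by unfold Spec_bear_dollars; infer_instance

-- ===== CLAIM (what is proved, stated in full; the proofs are below) =====
def Claim_equal_bear_dollars : Prop := ∀ (jobs : List (Int × String)), Dom_bear_dollars jobs → Spec_bear_dollars jobs (bear_dollars jobs)

-- ===== LEMMAS AND PROOFS =====
def bearSum4 (s : Int × Int × Int × Int) : Int := s.1 + s.2.1 + s.2.2.1 + s.2.2.2

theorem bear_alt_cons (j : Int × String) (rest : List (Int × String)) :
    bear_dollars_alt (j :: rest) =
      (if PySem.Str.lower j.2 = "close friend" then j.1 * 25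
       else if PySem.Str.lower j.2 = "acquaintance" then j.1 * 100
       else if PySem.Str.lower j.2 = "friend" then j.1 * 50
       else j.1 * 125) + bear_dollars_alt rest := by
  simp only [bear_dollars_alt, bearCatSum, List.map_cons, List.filter_cons, List.sum_cons,
    decide_eq_true_eq]
  split_ifs <;> simp_all <;> ring

theorem bearLoop_sum (jobs : List (Int × String)) (s : Int × Int × Int × Int) :
    bearSum4 (bearLoop jobs s) = bearSum4 s + bear_dollars_alt jobs := by
  induction jobs generalizing s with
  | nil => simp [bearLoop, bear_dollars_alt, bearCatSum, bearSum4]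
  | cons j rest ih =>
    obtain ⟨cf, aq, fr, rg⟩ := s
    rw [bear_alt_cons]
    simp only [bearLoop]
    split_ifs with h1 h2 h3 <;> rw [ih] <;> simp [bearSum4] <;> ring

-- ===== VERDICT (by name: the statement is the Claim_ definition above) =====
theorem bear_dollars_spec : Claim_equal_bear_dollars := by
  intro jobs _
  unfold Spec_bear_dollars bear_dollars
  have h := bearLoop_sum jobs (0, 0, 0, 0)
  rcases hbl : bearLoop jobs (0, 0, 0, 0) with ⟨cf, aq, fr, rg⟩
  rw [hbl] at h
  simpa [bearSum4] using h
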